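-- pv_equiv track=rewrite | github.com/Fredrik-Jonssonn/KTH-projects2022 | frejon6-ovn3-main/uppgift3.3VG.py | _sign_partition_test
-- ===== SOURCE A (Python) =====
-- def _sign_partition_test(v):
--     """Return True if the vector v storing numbers (float or int) is
--     ordered so that the negative elements come first, else return False"""
--     non_negative_part = False
--     for i in range(len(v)):
--         if v[i] >= 0:
--             non_negative_part = True
--         elif non_negative_part is True:
--             return False
--     return True
-- ===== SOURCE B (Python) =====
-- def _sign_partition_test(v):
--     """Negatives-first check via sort: the sign pattern [x >= 0 for x in v]
--     is negatives-first exactly when it is already sorted (False < True)."""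
--     signs = [x >= 0 for x in v]
--     return signs == sorted(signs)
-- ===== Notes on version B (the rewrite author's own statement) =====
-- stated objective: simpler
-- what changed: Replaces A's stateful early-return scan with building the boolean sign pattern and comparing it to its sorted self (negatives-first iff the pattern is already sorted).
import Mathlib
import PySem

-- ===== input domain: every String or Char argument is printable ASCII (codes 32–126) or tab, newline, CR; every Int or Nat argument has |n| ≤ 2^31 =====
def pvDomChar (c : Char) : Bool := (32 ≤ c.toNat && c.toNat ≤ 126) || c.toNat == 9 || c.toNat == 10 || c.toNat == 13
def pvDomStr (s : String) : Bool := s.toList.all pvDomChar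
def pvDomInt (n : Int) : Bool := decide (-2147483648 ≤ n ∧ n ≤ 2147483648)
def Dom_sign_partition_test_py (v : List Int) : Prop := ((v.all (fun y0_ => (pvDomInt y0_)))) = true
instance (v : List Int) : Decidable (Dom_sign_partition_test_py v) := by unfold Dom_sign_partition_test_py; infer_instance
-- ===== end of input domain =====

-- B replaces A's stateful early-return scan with a build-then-sort-and-compare on the sign pattern (simpler decomposition, not faster).


-- ===== PORT A =====
-- the for-loop over range(len(v)) with the non_negative_part flag and the early 'return False'
def signPartLoopA : List Int → Bool → Bool
  | [], _ => true
  | x :: t, flag =>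
      if x ≥ 0 then signPartLoopA t true
      else if flag then false
      else signPartLoopA t flag

def sign_partition_test_py (v : List Int) : Bool := signPartLoopA v false

-- ===== PORT B =====
def sign_partition_test_py_alt (v : List Int) : Bool :=
  let signs := v.map (fun x => decide (x ≥ 0))
  signs == PySem.List.sorted signs (fun b => b) false

-- ===== PRECONDITION & SPEC =====
def Spec_sign_partition_test_py (v : List Int) (out : Bool) : Prop := out = sign_partition_test_py_alt v
instance (v : List Int) (out : Bool) : Decidable (Spec_sign_partition_test_py v out) := by unfold Spec_sign_partition_test_py; infer_instance

-- ===== CLAIM (what is proved, stated in full; the proofs are below) =====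
def Claim_equal_sign_partition_test_py : Prop := ∀ (v : List Int), Dom_sign_partition_test_py v → Spec_sign_partition_test_py v (sign_partition_test_py v)

-- ===== LEMMAS AND PROOFS =====

theorem signPartLoopA_true_iff (t : List Int) :
    signPartLoopA t true = true ↔ ∀ x ∈ t, 0 ≤ x := by
  induction t with
  | nil => simp [signPartLoopA]
  | cons x t ih =>
      by_cases h : x ≥ 0
      · simp [signPartLoopA, h, ih]
      · have hf : signPartLoopA (x :: t) true = false := by simp [signPartLoopA, h]
        rw [hf]
        simp only [Bool.false_eq_true, false_iff]
        push Not
        exact ⟨x, List.mem_cons_self .., by omega⟩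

theorem signPartLoopA_false_iff (t : List Int) :
    signPartLoopA t false = true ↔ (t.map (fun x => decide (x ≥ 0))).Pairwise (· ≤ ·) := by
  induction t with
  | nil => simp [signPartLoopA]
  | cons x t ih =>
      by_cases h : x ≥ 0
      · rw [show signPartLoopA (x :: t) false = signPartLoopA t true by
            simp [signPartLoopA, h]]
        rw [signPartLoopA_true_iff]
        simp only [List.map_cons, List.pairwise_cons, decide_eq_true h]
        constructor
        · intro hall
          refine ⟨?_, ?_⟩
          · intro b hb
            rcases List.mem_map.mp hb with ⟨y, hy, rfl⟩
            simp [hall y hy]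
          · exact List.pairwise_of_forall_mem_list (fun a ha b hb => by
              rcases List.mem_map.mp ha with ⟨y, hy, rfl⟩
              rcases List.mem_map.mp hb with ⟨z, hz, rfl⟩
              simp [hall y hy, hall z hz])
        · rintro ⟨hall, -⟩ y hy
          have hle := hall _ (List.mem_map.mpr ⟨y, hy, rfl⟩)
          exact of_decide_eq_true (le_antisymm hle (Bool.le_true _)).symm
      · rw [show signPartLoopA (x :: t) false = signPartLoopA t false by
            simp [signPartLoopA, h]]
        rw [ih]
        simp only [List.map_cons, List.pairwise_cons, decide_eq_false h]
        constructor
        · intro hp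
          exact ⟨fun b _ => Bool.false_le b, hp⟩
        · exact fun ⟨_, hp⟩ => hp

theorem alt_true_iff (v : List Int) :
    sign_partition_test_py_alt v = true ↔ (v.map (fun x => decide (x ≥ 0))).Pairwise (· ≤ ·) := by
  unfold sign_partition_test_py_alt
  simp only [beq_iff_eq]
  constructor
  · intro he
    have hp := PySem.List.sorted_pairwise (xs := v.map (fun x => decide (x ≥ 0)))
      (key := fun b => b)
    rw [← he] at hp
    exact hp
  · intro hp
    exact (PySem.List.sorted_eq_self_of_pairwise _ _ hp).symm

-- ===== VERDICT (by name: the statement is the Claim_ definition above) =====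
theorem sign_partition_test_py_spec : Claim_equal_sign_partition_test_py := by
  intro v _
  unfold Spec_sign_partition_test_py sign_partition_test_py
  rw [Bool.eq_iff_iff, signPartLoopA_false_iff, alt_true_iff]
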